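-- pv_equiv track=rewrite | github.com/YuriShvetsov/Timus-Online-Judge | 1149 - Sinus Dances.py | An
-- ===== SOURCE A (Python) =====
-- def An(num):
--     sin = 'sin('
--     k = 1
--     while k < num:
--         if k % 2 != 0:
--             sin += str(k) + '-sin('
--         else:
--             sin += str(k) + '+sin('
--         k += 1
--
--     if num % 2 != 0:
--         sin += str(num) + ')'*num
--     else:
--         sin += str(num) + ')'*num
--
--     return sin
-- ===== SOURCE B (Python) =====
-- def An(num):
--     # Divide-and-conquer: seg(lo, hi) is the chain of pieces 'k(+|-)sin(' for
--     # k in [lo, hi), built by balanced concatenation; wrap once at the top.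
--     def seg(lo, hi):
--         if hi - lo >= 2:
--             mid = (lo + hi) // 2
--             return seg(lo, mid) + seg(mid, hi)
--         if hi - lo == 1:
--             return str(lo) + ('-' if lo % 2 != 0 else '+') + 'sin('
--         return ''
--     return 'sin(' + seg(1, num) + str(num) + ')' * num
-- ===== Notes on version B (the rewrite author's own statement) =====
-- stated objective: faster
-- what changed: Replaces A's flat left-to-right while-loop string accumulation with a divide-and-conquer helper that builds the chain of 'k(+|-)sin(' pieces by balanced concatenation and wraps it once at the top.
import Mathlib
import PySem

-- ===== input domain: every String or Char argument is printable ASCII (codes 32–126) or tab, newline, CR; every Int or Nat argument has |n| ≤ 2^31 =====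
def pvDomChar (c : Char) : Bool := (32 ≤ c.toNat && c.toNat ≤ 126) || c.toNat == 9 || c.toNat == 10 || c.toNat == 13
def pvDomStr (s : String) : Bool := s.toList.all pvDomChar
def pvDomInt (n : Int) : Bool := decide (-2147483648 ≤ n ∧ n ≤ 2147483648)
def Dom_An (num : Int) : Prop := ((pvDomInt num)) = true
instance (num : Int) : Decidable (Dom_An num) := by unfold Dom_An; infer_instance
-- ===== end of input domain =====

-- B builds the chain of 'k±sin(' pieces by balanced divide-and-conquer concatenation
-- instead of A's flat left-to-right while-loop accumulation (alternative decomposition).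

-- ===== PORT A =====
-- A's while loop, as a counted recursion: fuel = number of remaining iterations (num - k).toNat
def AnLoop : Nat → Int → String → String
  | 0, _, sin => sin
  | n+1, k, sin =>
      AnLoop n (k+1)
        (if PySem.Int.mod k 2 ≠ 0 then sin ++ PySem.Int.toStr k ++ "-sin("
         else sin ++ PySem.Int.toStr k ++ "+sin(")

def An (num : Int) : String :=
  let sin := AnLoop (num - 1).toNat 1 "sin("
  if PySem.Int.mod num 2 ≠ 0 then
    sin ++ PySem.Int.toStr num ++ String.ofList (List.replicate num.toNat ')')
  else
    sin ++ PySem.Int.toStr num ++ String.ofList (List.replicate num.toNat ')')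

-- ===== PORT B =====
-- seg(lo, hi) of Source B: the pieces for k in [lo, hi), by balanced concatenation
def AnSeg (lo hi : Int) : String :=
  if _h : hi - lo ≥ 2 then
    AnSeg lo (PySem.Int.floordiv (lo + hi) 2) ++ AnSeg (PySem.Int.floordiv (lo + hi) 2) hi
  else if hi - lo = 1 then
    PySem.Int.toStr lo ++ (if PySem.Int.mod lo 2 ≠ 0 then "-" else "+") ++ "sin("
  else ""
termination_by (hi - lo).toNat
decreasing_by
  all_goals rw [PySem.Int.floordiv_eq_ediv_of_pos (by omega : (0:Int) < 2)]; omega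

def An_alt (num : Int) : String :=
  "sin(" ++ AnSeg 1 num ++ PySem.Int.toStr num ++ String.ofList (List.replicate num.toNat ')')

-- ===== PRECONDITION & SPEC =====
def Spec_An (num : Int) (out : String) : Prop := out = An_alt num
instance (num : Int) (out : String) : Decidable (Spec_An num out) := by unfold Spec_An; infer_instance

-- ===== CLAIM (what is proved, stated in full; the proofs are below) =====
def Claim_equal_An : Prop := ∀ (num : Int), Dom_An num → Spec_An num (An num)

-- ===== LEMMAS AND PROOFS =====
-- linear (piece-by-piece) reference form of the chain of pieces, used only in proofs
def AnLin : Int → Nat → String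
  | _, 0 => ""
  | lo, n+1 =>
      PySem.Int.toStr lo ++ (if PySem.Int.mod lo 2 ≠ 0 then "-" else "+") ++ "sin(" ++ AnLin (lo+1) n

theorem AnLin_concat : ∀ (p : Nat) (lo : Int) (q : Nat),
    AnLin lo p ++ AnLin (lo + (p : Int)) q = AnLin lo (p + q) := by
  intro p
  induction p with
  | zero => intro lo q; simp [AnLin]
  | succ p ih =>
      intro lo q
      have h1 : lo + ((p : Int) + 1) = (lo + 1) + (p : Int) := by ring
      simp only [AnLin, Nat.cast_add, Nat.cast_one, String.append_assoc, h1, ih,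
        Nat.succ_add]

theorem AnSeg_eq_lin : ∀ (n : Nat) (lo hi : Int), (hi - lo).toNat = n →
    AnSeg lo hi = AnLin lo n := by
  intro n
  induction n using Nat.strong_induction_on with
  | _ n ih =>
      intro lo hi hn
      rw [AnSeg]
      by_cases h2 : hi - lo ≥ 2
      · rw [dif_pos h2]
        have hmid : PySem.Int.floordiv (lo + hi) 2 = (lo + hi) / 2 :=
          PySem.Int.floordiv_eq_ediv_of_pos (by omega)
        set mid := PySem.Int.floordiv (lo + hi) 2 with hmdef
        have hlo : lo < mid := by omega
        have hhi : mid < hi := by omega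
        rw [ih (mid - lo).toNat (by omega) lo mid rfl,
            ih (hi - mid).toNat (by omega) mid hi rfl]
        have hm : AnLin mid (hi - mid).toNat = AnLin (lo + ((mid - lo).toNat : Int)) (hi - mid).toNat := by
          congr 1; omega
        rw [hm, AnLin_concat]
        congr 1
        omega
      · rw [dif_neg h2]
        by_cases h1 : hi - lo = 1
        · have : n = 1 := by omega
          subst this
          simp [h1, AnLin]
        · have : n = 0 := by omega
          subst this
          simp [h1, AnLin]

theorem AnLoop_eq_lin : ∀ (n : Nat) (lo : Int) (s : String),
    AnLoop n lo s = s ++ AnLin lo n := by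
  intro n
  induction n with
  | zero => intro lo s; simp [AnLoop, AnLin]
  | succ n ih =>
      intro lo s
      simp only [AnLoop, AnLin, ih]
      split_ifs <;> (simp only [String.append_assoc]; rfl)

-- ===== VERDICT (by name: the statement is the Claim_ definition above) =====
theorem An_spec : Claim_equal_An := by
  intro num _
  unfold Spec_An An An_alt
  rw [ite_self, AnLoop_eq_lin, AnSeg_eq_lin (num - 1).toNat 1 num (by omega)]
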